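-- pv_equiv track=rewrite | github.com/jagdish-git/Interview-Programs | augpro/junepro/q34.py | count_characters_reversed
-- ===== SOURCE A (Python) =====
-- def count_characters_reversed(input_string):
--     # Reverse the input string
--     reversed_string = input_string[::-1]
--
--     # Dictionary to store the count of each character
--     char_count = {}
--
--     # Count occurrences of each character
--     for char in reversed_string:
--         if char != ' ':  # Skip spaces
--             if char in char_count:
--                 char_count[char] += 1
--             else:
--                 char_count[char] = 1
--
--     # Create the output string by iterating through the dictionary
--     output = ''
--     for char in reversed_string:
--         if char != ' ' and char in char_count:
--             output += f"{char}{char_count[char]}"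
--             del char_count[char]  # Remove the character after processing
--
--     return output
-- ===== SOURCE B (Python) =====
-- def count_characters_reversed(input_string):
--     # Consume the string from the end: pop the last character, emit it with
--     # 1 + its count in the remainder, then delete its remaining occurrences.
--     # No counting dict and no dedup pass: order and uniqueness fall out of
--     # popping from the end and removing processed characters.
--     chars = list(input_string)
--     pieces = []
--     while chars:
--         c = chars.pop()
--         if c == ' ':
--             continue
--         pieces.append(f"{c}{1 + chars.count(c)}")
--         chars = [x for x in chars if x != c]
--     return ''.join(pieces)
-- ===== Notes on version B (the rewrite author's own statement) =====
-- stated objective: alternative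
-- what changed: A builds a character-count dict in one pass and then re-scans the reversed string emitting char+count and deleting dict keys to deduplicate; B keeps no dict at all: it destructively consumes the character list from the end, popping the last character, emitting it with 1 + its count in the remainder, and filtering out its remaining occurrences, so ordering and deduplication come from removal rather than from dict bookkeeping.
import Mathlib
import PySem

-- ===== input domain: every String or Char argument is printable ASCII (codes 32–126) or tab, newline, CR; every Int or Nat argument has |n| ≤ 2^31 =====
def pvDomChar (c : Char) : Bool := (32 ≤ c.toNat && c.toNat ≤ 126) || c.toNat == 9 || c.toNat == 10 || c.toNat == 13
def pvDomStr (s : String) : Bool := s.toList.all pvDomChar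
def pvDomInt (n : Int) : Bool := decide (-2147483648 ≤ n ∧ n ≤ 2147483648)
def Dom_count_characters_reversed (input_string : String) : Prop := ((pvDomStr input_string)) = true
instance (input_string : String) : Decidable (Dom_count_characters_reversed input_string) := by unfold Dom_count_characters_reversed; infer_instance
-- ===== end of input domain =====

-- B replaces A's count-dict + dict-deleting dedup scan by a destructive consume-from-the-end
-- loop (pop last char, emit 1 + count of the remainder, filter out its occurrences); objective: alternative.

-- ===== PORT A =====
def count_characters_reversed (input_string : String) : String :=
  -- reversed_string = input_string[::-1]
  let reversed_string := (PySem.List.slice? input_string.toList none none (-1)).getD []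
  -- for char in reversed_string: count non-space occurrences
  let char_count : PySem.Dict Char Int :=
    reversed_string.foldl (fun d ch =>
      if ch != ' ' then
        if d.contains ch then d.insert ch (d.getD ch 0 + 1)
        else d.insert ch 1
      else d) PySem.Dict.empty
  -- for char in reversed_string: emit "{char}{count}" then delete the key
  let res := reversed_string.foldl
      (fun (s : List Char × PySem.Dict Char Int) ch =>
        if ch != ' ' && s.2.contains ch then
          (s.1 ++ ([ch] ++ PySem.Int.toChars (s.2.getD ch 0)), s.2.erase ch)
        else s) ([], char_count)
  String.ofList res.1

-- ===== PORT B =====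
-- while chars: c = chars.pop() (= last element, list nonempty); if c == ' ': continue;
-- pieces.append(f"{c}{1 + chars.count(c)}"); chars = [x for x in chars if x != c]
def pvAltLoop (chars : List Char) (pieces : List (List Char)) : List (List Char) :=
  if h : chars = [] then pieces
  else
    let c := chars.getLast h         -- chars.pop(): last element …
    let rest := chars.dropLast       -- … and the list without it
    if c = ' ' then pvAltLoop rest pieces
    else pvAltLoop (rest.filter (fun x => x != c))
      (pieces ++ [[c] ++ PySem.Int.toChars ((1 + rest.count c : Nat) : Int)])
termination_by chars.length
decreasing_by
  · have := List.length_pos_iff.mpr h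
    simp only [List.length_dropLast]; omega
  · have h1 : (chars.dropLast.filter (fun x => x != chars.getLast h)).length
        ≤ chars.dropLast.length := List.length_filter_le _ _
    have := List.length_pos_iff.mpr h
    simp only [List.length_dropLast] at h1 ⊢; omega

def count_characters_reversed_alt (input_string : String) : String :=
  -- chars = list(input_string); pieces = []; while-loop; return ''.join(pieces)
  String.ofList (PySem.Chars.join [] (pvAltLoop input_string.toList []))

-- ===== PRECONDITION & SPEC =====
def Spec_count_characters_reversed (input_string : String) (out : String) : Prop := out = count_characters_reversed_alt input_string
instance (input_string : String) (out : String) : Decidable (Spec_count_characters_reversed input_string out) := by unfold Spec_count_characters_reversed; infer_instance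

-- ===== CLAIM (what is proved, stated in full; the proofs are below) =====
def Claim_equal_count_characters_reversed : Prop := ∀ (input_string : String), Dom_count_characters_reversed input_string → Spec_count_characters_reversed input_string (count_characters_reversed input_string)

-- ===== LEMMAS AND PROOFS =====

-- first occurrences of l, in order
def pvFirsts : List Char → List Char
  | [] => []
  | c :: l => c :: (pvFirsts l).filter (fun x => x != c)

theorem pv_mem_firsts (x : Char) (l : List Char) : x ∈ pvFirsts l ↔ x ∈ l := by
  induction l with
  | nil => simp [pvFirsts]
  | cons c t ih =>
    simp only [pvFirsts, List.mem_cons, List.mem_filter, ih, bne_iff_ne, ne_eq]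
    by_cases h : x = c <;> simp [h]

theorem pv_join_nil (ps : List (List Char)) : PySem.Chars.join [] ps = ps.flatten := by
  induction ps with
  | nil => rfl
  | cons h t ih =>
    cases t with
    | nil => simp [PySem.Chars.join, List.intercalate]
    | cons b t2 =>
      simp only [PySem.Chars.join, List.intercalate, List.intersperse] at *
      simp_all

theorem pv_find_filter (items : List (Char × Int)) (c x : Char) (h : x ≠ c) :
    List.find? (fun p => p.1 == x) (items.filter (fun p => !(p.1 == c))) =
      List.find? (fun p => p.1 == x) items := by
  induction items with
  | nil => rfl
  | cons p t ih =>
    by_cases hp : p.1 = c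
    · rw [List.filter_cons_of_neg (by simp [hp]), List.find?_cons_of_neg (by simp [hp, h.symm])]
      exact ih
    · rw [List.filter_cons_of_pos (by simp [hp])]
      by_cases hx : p.1 = x
      · rw [List.find?_cons_of_pos (by simp [hx]), List.find?_cons_of_pos (by simp [hx])]
      · rw [List.find?_cons_of_neg (by simp [hx]), List.find?_cons_of_neg (by simp [hx])]
        exact ih

theorem pv_contains_erase (d : PySem.Dict Char Int) (c x : Char) :
    (d.erase c).contains x = (x != c && d.contains x) := by
  obtain ⟨items⟩ := d
  simp only [PySem.Dict.erase, PySem.Dict.contains, List.any_filter]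
  by_cases h : x = c
  · rw [h]
    have hall : ∀ p : Char × Int, (!(p.1 == c) && (p.1 == c)) = false := by
      intro p; cases hp : (p.1 == c) <;> simp
    simp [hall]
  · have hx : (x != c) = true := by simp [h]
    simp only [hx, Bool.true_and]
    refine PySem.List.any_congr_mem ?_
    intro p _
    by_cases hp : p.1 = c
    · rw [hp]; simp [Ne.symm h]
    · simp [hp]

theorem pv_getD_erase_of_ne (d : PySem.Dict Char Int) (c x : Char) (h : x ≠ c) :
    (d.erase c).getD x 0 = d.getD x 0 := by
  obtain ⟨items⟩ := d
  simp only [PySem.Dict.getD, PySem.Dict.get?, PySem.Dict.erase]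
  rw [pv_find_filter items c x h]

theorem pv_countdict (l : List Char) :
    l.foldl (fun d ch =>
      if ch != ' ' then
        if d.contains ch then d.insert ch (d.getD ch 0 + 1)
        else d.insert ch 1
      else d) PySem.Dict.empty
    = PySem.Dict.counter (l.filter (fun c => c != ' ')) := by
  have hstep : (fun (d : PySem.Dict Char Int) ch =>
      if ch != ' ' then
        if d.contains ch then d.insert ch (d.getD ch 0 + 1)
        else d.insert ch 1
      else d) = (fun d ch => if (ch != ' ') = true then d.insert ch (d.getD ch 0 + 1) else d) := by
    funext d ch
    by_cases hs : (ch != ' ') = true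
    · simp only [hs, if_true]
      by_cases hc : d.contains ch = true
      · simp [hc]
      · have h0 : d.getD ch 0 = 0 := PySem.Dict.getD_of_not_contains d 0 (by simp [hc])
        rw [if_neg (by simp [hc]), h0, zero_add]
    · simp [hs]
  rw [hstep, PySem.List.foldl_if_eq_foldl_filter (p := fun ch : Char => ch != ' ')
    (f := fun (d : PySem.Dict Char Int) ch => d.insert ch (d.getD ch 0 + 1)),
    PySem.Dict.foldl_insert_getD_add_one_eq_counter]

theorem pv_emit (l : List Char) : ∀ (d : PySem.Dict Char Int) (acc : List Char),
    (l.foldl (fun (s : List Char × PySem.Dict Char Int) ch =>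
        if ch != ' ' && s.2.contains ch then
          (s.1 ++ ([ch] ++ PySem.Int.toChars (s.2.getD ch 0)), s.2.erase ch)
        else s) (acc, d)).1
    = acc ++ (((pvFirsts l).filter (fun c => c != ' ' && d.contains c)).map
        (fun c => [c] ++ PySem.Int.toChars (d.getD c 0))).flatten := by
  induction l with
  | nil => intro d acc; simp [pvFirsts]
  | cons c t ih =>
    intro d acc
    simp only [List.foldl_cons, pvFirsts]
    by_cases h : (c != ' ' && d.contains c) = true
    · rw [if_pos h, ih, List.filter_cons_of_pos (p := fun c => c != ' ' && d.contains c) h,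
        List.map_cons, List.flatten_cons]
      have hfil : (pvFirsts t).filter (fun x => x != ' ' && (d.erase c).contains x)
          = ((pvFirsts t).filter (fun x => x != c)).filter (fun x => x != ' ' && d.contains x) := by
        rw [List.filter_filter]
        refine List.filter_congr ?_
        intro x _
        rw [pv_contains_erase]
        by_cases hx : x = c
        · rw [hx]; simp
        · have hxc : (x != c) = true := by simp [hx]
          cases hb : (x != ' ') <;> cases hc2 : d.contains x <;> simp_all
      have hmap : List.map (fun x => [x] ++ PySem.Int.toChars ((d.erase c).getD x 0))
            ((pvFirsts t).filter (fun x => x != ' ' && (d.erase c).contains x))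
          = List.map (fun x => [x] ++ PySem.Int.toChars (d.getD x 0))
            (((pvFirsts t).filter (fun x => x != c)).filter (fun x => x != ' ' && d.contains x)) := by
        rw [hfil]
        refine List.map_congr_left ?_
        intro x hx
        rw [List.mem_filter, List.mem_filter] at hx
        have hxc : x ≠ c := by
          have := hx.1.2; simpa [bne_iff_ne] using this
        rw [pv_getD_erase_of_ne d c x hxc]
      rw [hmap]
      simp [List.append_assoc]
    · rw [if_neg h, ih,
        List.filter_cons_of_neg (p := fun c => c != ' ' && d.contains c) (by exact h),
        List.filter_filter]
      congr 2
      refine congrArg (List.map _) (List.filter_congr ?_)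
      intro x _
      by_cases hx : x = c
      · rw [hx]
        simp only [Bool.not_eq_true] at h
        simp [h]
      · simp [hx]

-- first occurrences commute with filtering
theorem pv_firsts_filter (p : Char → Bool) (l : List Char) :
    pvFirsts (l.filter p) = (pvFirsts l).filter p := by
  induction l with
  | nil => simp [pvFirsts]
  | cons a t ih =>
    by_cases hp : p a = true
    · rw [List.filter_cons_of_pos hp]
      simp only [pvFirsts, ih, List.filter_cons_of_pos hp, List.filter_filter]
      congr 1
      refine List.filter_congr ?_
      intro x _
      rw [Bool.and_comm]
    · rw [List.filter_cons_of_neg (by simpa using hp)]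
      simp only [pvFirsts, ih, List.filter_cons_of_neg (by simpa using hp), List.filter_filter]
      refine (List.filter_congr ?_).symm
      intro x _
      by_cases hx : x = a
      · subst hx; simp only [Bool.not_eq_true] at hp; simp [hp]
      · simp [hx]

-- B's loop in closed form
theorem pv_altLoop (n : Nat) : ∀ (l : List Char), l.length ≤ n → ∀ pieces,
    pvAltLoop l pieces = pieces ++ (((pvFirsts l.reverse).filter (fun c => c != ' ')).map
      (fun c => [c] ++ PySem.Int.toChars ((l.reverse.count c : Nat) : Int))) := by
  induction n with
  | zero =>
    intro l hl pieces
    have : l = [] := List.eq_nil_of_length_eq_zero (Nat.le_zero.mp hl)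
    subst this
    simp [pvAltLoop, pvFirsts]
  | succ n ih =>
    intro l hl pieces
    by_cases h : l = []
    · subst h; simp [pvAltLoop, pvFirsts]
    · rw [pvAltLoop]
      rw [dif_neg h]
      have hsplit : l.dropLast ++ [l.getLast h] = l := List.dropLast_append_getLast h
      have hrev : l.reverse = l.getLast h :: l.dropLast.reverse := by
        conv_lhs => rw [← hsplit]
        simp
      have hlen : l.dropLast.length ≤ n := by
        have := List.length_pos_iff.mpr h
        simp only [List.length_dropLast]; omega
      by_cases hc : l.getLast h = ' '
      · rw [hc, if_pos rfl, ih _ hlen, hrev, hc]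
        simp only [pvFirsts]
        rw [List.filter_cons_of_neg (by simp), List.filter_filter]
        simp only [Bool.and_self]
        congr 1
        refine (List.map_congr_left ?_).symm
        intro x hx
        rw [List.mem_filter] at hx
        have hxne : x ≠ ' ' := by simpa using hx.2
        rw [List.count_cons_of_ne hxne.symm]
      · rw [if_neg hc, ih _ (le_trans (List.length_filter_le _ _) hlen), hrev]
        simp only [pvFirsts, ← List.filter_reverse]
        rw [pv_firsts_filter, List.filter_cons_of_pos (by simpa using hc), List.map_cons,
          List.append_assoc]
        congr 1
        rw [List.singleton_append]
        congr 1
        · congr 2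
          rw [List.count_cons_self, List.count_reverse]
          omega
        · refine List.map_congr_left ?_
          intro x hx
          rw [List.mem_filter, List.mem_filter] at hx
          have hxc : x ≠ l.getLast h := by simpa using hx.1.2
          rw [List.count_filter (by simpa using hxc), List.count_cons_of_ne hxc.symm]

-- ===== VERDICT (by name: the statement is the Claim_ definition above) =====
theorem count_characters_reversed_spec : Claim_equal_count_characters_reversed := by
  intro s _
  unfold Spec_count_characters_reversed count_characters_reversed count_characters_reversed_alt
  simp only [PySem.List.slice?_none_none_neg_one, Option.getD_some]
  rw [pv_countdict, pv_emit, pv_altLoop s.toList.length s.toList le_rfl [], pv_join_nil,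
    List.nil_append, List.nil_append]
  congr 1
  have hfil : (pvFirsts s.toList.reverse).filter
      (fun c => c != ' ' && (PySem.Dict.counter (s.toList.reverse.filter (fun c => c != ' '))).contains c)
      = (pvFirsts s.toList.reverse).filter (fun c => c != ' ') := by
    refine List.filter_congr ?_
    intro x hx
    rw [PySem.Dict.contains_counter]
    cases hxs : (x != ' ')
    · simp
    · simp only [Bool.true_and]
      have : x ∈ s.toList.reverse := (pv_mem_firsts x _).mp hx
      simp only [List.contains_eq_any_beq, List.any_eq_true]
      exact ⟨x, List.mem_filter.mpr ⟨this, hxs⟩, by simp⟩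
  rw [hfil]
  congr 1
  refine List.map_congr_left ?_
  intro x hx
  rw [List.mem_filter] at hx
  rw [PySem.Dict.getD_counter, List.count_filter (p := fun c => c != ' ') hx.2]
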